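-- pv_equiv track=rewrite | github.com/thereyeslab/Smol-FIESTA | SMol_FIESTA/track_sorting.py | tabulate_frame_count
-- ===== SOURCE A (Python) =====
-- def tabulate_frame_count(tracks):
--     total = 0
--     frames = {}
--     for track in tracks:
--         for spot in track:
--             if spot[0] in frames:
--                 if frames[spot[0]] == 1: total += 1
--                 frames[spot[0]] += 1
--             else:
--                 frames[spot[0]] = 1
--     return total, frames
-- ===== SOURCE B (Python) =====
-- def tabulate_frame_count(tracks):
--     allf = [spot[0] for track in tracks for spot in track]
--     frames = {f: allf.count(f) for f in dict.fromkeys(allf)}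
--     total = sum(1 for v in frames.values() if v > 1)
--     return total, frames
-- ===== Notes on version B (the rewrite author's own statement) =====
-- stated objective: simpler
-- what changed: B flattens all frame numbers into one list, dedups it with dict.fromkeys, and builds each key's count by a direct allf.count(f) per distinct frame plus a separate sum over the finished values, replacing A's incremental dict maintenance and fused duplicate counting entirely.
import Mathlib
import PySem

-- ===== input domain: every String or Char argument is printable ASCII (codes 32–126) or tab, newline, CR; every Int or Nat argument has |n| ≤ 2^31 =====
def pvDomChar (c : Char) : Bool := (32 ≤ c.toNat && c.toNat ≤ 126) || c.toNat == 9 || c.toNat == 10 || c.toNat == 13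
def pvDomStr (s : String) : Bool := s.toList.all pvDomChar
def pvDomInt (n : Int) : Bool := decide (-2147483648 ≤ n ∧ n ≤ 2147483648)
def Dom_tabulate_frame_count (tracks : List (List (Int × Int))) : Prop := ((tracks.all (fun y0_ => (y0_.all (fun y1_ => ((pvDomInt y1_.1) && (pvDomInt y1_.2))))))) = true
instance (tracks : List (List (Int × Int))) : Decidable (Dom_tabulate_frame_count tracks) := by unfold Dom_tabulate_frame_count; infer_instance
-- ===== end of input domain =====

-- B flattens the frame numbers, dedups with dict.fromkeys and counts each distinct frame
-- with list.count plus a separate sum over the values (build-by-counting instead of A's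
-- incremental dict maintenance; simpler decomposition, not faster).


-- ===== PORT A =====
-- one inner-loop body of A: branch on membership, bump total when the count was 1
def tfcStepA (st : Int × PySem.Dict Int Int) (spot : Int × Int) : Int × PySem.Dict Int Int :=
  match st.2.get? spot.1 with
  | some v => ((if v == 1 then st.1 + 1 else st.1), st.2.insert spot.1 (v + 1))
  | none => (st.1, st.2.insert spot.1 1)

def tabulate_frame_count (tracks : List (List (Int × Int))) : Int × (List (Int × Int)) :=
  let st := tracks.foldl (fun st track => track.foldl tfcStepA st) (0, PySem.Dict.empty)
  (st.1, st.2.items)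

-- ===== PORT B =====
def tabulate_frame_count_alt (tracks : List (List (Int × Int))) : Int × (List (Int × Int)) :=
  -- allf = [spot[0] for track in tracks for spot in track]
  let allf := tracks.flatMap (fun track => track.map (fun spot => spot.1))
  -- frames = {f: allf.count(f) for f in dict.fromkeys(allf)}
  let frames := (PySem.List.dedup allf).map (fun f => (f, (PySem.List.count allf f : Int)))
  -- total = sum(1 for v in frames.values() if v > 1)
  let total := (frames.map Prod.snd).foldl (fun t v => if v > 1 then t + 1 else t) 0
  (total, frames)

-- ===== PRECONDITION & SPEC =====
def Spec_tabulate_frame_count (tracks : List (List (Int × Int))) (out : Int × (List (Int × Int))) : Prop := out = tabulate_frame_count_alt tracks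
instance (tracks : List (List (Int × Int))) (out : Int × (List (Int × Int))) : Decidable (Spec_tabulate_frame_count tracks out) := by unfold Spec_tabulate_frame_count; infer_instance

-- ===== CLAIM (what is proved, stated in full; the proofs are below) =====
def Claim_equal_tabulate_frame_count : Prop := ∀ (tracks : List (List (Int × Int))), Dom_tabulate_frame_count tracks → Spec_tabulate_frame_count tracks (tabulate_frame_count tracks)

-- ===== LEMMAS AND PROOFS =====

-- proof-side: the getD-increment step (Counter-building step) on a bare key
def tfcStepC (d : PySem.Dict Int Int) (k : Int) : PySem.Dict Int Int :=
  d.insert k (d.getD k 0 + 1)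

-- number of entries with value > 1 (proof-side characterisation of both totals)
def tfcCnt : List (Int × Int) → Int
  | [] => 0
  | p :: rest => (if p.2 > 1 then 1 else 0) + tfcCnt rest

lemma tfc_foldl_values (l : List (Int × Int)) (t0 : Int) :
    (l.map Prod.snd).foldl (fun t v => if v > 1 then t + 1 else t) t0 = t0 + tfcCnt l := by
  induction l generalizing t0 with
  | nil => simp [tfcCnt]
  | cons p rest ih =>
      simp only [List.map_cons, List.foldl_cons, tfcCnt, ih]
      split_ifs <;> ring

lemma tfc_cnt_append (l : List (Int × Int)) (k v : Int) :
    tfcCnt (l ++ [(k, v)]) = tfcCnt l + (if v > 1 then 1 else 0) := by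
  induction l with
  | nil => simp [tfcCnt]
  | cons p rest ih => simp only [List.cons_append, tfcCnt, ih]; ring

lemma tfc_cnt_map_update (l : List (Int × Int)) (k v : Int)
    (hnod : (l.map Prod.fst).Nodup) (hmem : (k, v) ∈ l) (hpos : ∀ p ∈ l, 1 ≤ p.2) :
    tfcCnt (l.map (fun p => if p.1 == k then (k, v + 1) else p)) =
      tfcCnt l + (if v == 1 then 1 else 0) := by
  induction l with
  | nil => cases hmem
  | cons p rest ih =>
      simp only [List.map_cons, List.nodup_cons, List.mem_map] at hnod
      by_cases hk : p.1 = k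
      · have hrest : ∀ q ∈ rest, q.1 ≠ k := fun q hq hqk => hnod.1 ⟨q, hq, by rw [hqk, hk]⟩
        have hpv : p = (k, v) := by
          rcases List.mem_cons.1 hmem with h | h
          · exact h.symm
          · exact absurd rfl (hrest _ h)
        have hmap : rest.map (fun p => if p.1 == k then (k, v + 1) else p) = rest := by
          conv_rhs => rw [← List.map_id rest]
          exact List.map_congr_left (fun q hq => by simp [hrest q hq])
        have hv1 : 1 ≤ v := by
          have := hpos p (List.mem_cons_self ..)
          rw [hpv] at this; exact this
        subst hpv
        simp only [List.map_cons, beq_self_eq_true, if_true, hmap, tfcCnt]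
        by_cases h1 : v = 1
        · subst h1; norm_num; omega
        · have h1' : (v == 1) = false := by simpa using h1
          simp only [h1', Bool.false_eq_true, if_false]
          split_ifs <;> omega
      · have hne : (p.1 == k) = false := by simpa using hk
        have hmem' : (k, v) ∈ rest := by
          rcases List.mem_cons.1 hmem with h | h
          · exact absurd (congrArg Prod.fst h).symm hk
          · exact h
        simp only [List.map_cons, hne, Bool.false_eq_true, if_false, tfcCnt]
        rw [ih hnod.2 hmem' (fun q hq => hpos q (List.mem_cons_of_mem _ hq))]
        ring

-- A's fold only looks at the first component of each spot
lemma tfc_foldA_eq_foldC (xs : List (Int × Int)) (st : Int × PySem.Dict Int Int) :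
    xs.foldl tfcStepA st
      = (xs.map Prod.fst).foldl
          (fun st k =>
            match st.2.get? k with
            | some v => ((if v == 1 then st.1 + 1 else st.1), st.2.insert k (v + 1))
            | none => (st.1, st.2.insert k 1)) st := by
  induction xs generalizing st with
  | nil => rfl
  | cons x rest ih => simp only [List.map_cons, List.foldl_cons, ih]; rfl

-- invariant: A's fused total/dict pass tracks the Counter-building fold
lemma tfc_inv (xs : List Int) (d : PySem.Dict Int Int)
    (hnod : d.keys.Nodup) (hpos : ∀ p ∈ d.items, 1 ≤ p.2) :
    xs.foldl
        (fun st k =>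
          match st.2.get? k with
          | some v => ((if v == 1 then st.1 + 1 else st.1), st.2.insert k (v + 1))
          | none => (st.1, st.2.insert k 1)) (tfcCnt d.items, d) =
      (tfcCnt (xs.foldl tfcStepC d).items, xs.foldl tfcStepC d) := by
  induction xs generalizing d with
  | nil => simp
  | cons x rest ih =>
      simp only [List.foldl_cons]
      have hstep :
          (match d.get? x with
            | some v => ((if v == 1 then tfcCnt d.items + 1 else tfcCnt d.items), d.insert x (v + 1))
            | none => (tfcCnt d.items, d.insert x 1))
            = (tfcCnt (tfcStepC d x).items, tfcStepC d x) := by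
        unfold tfcStepC
        cases hg : d.get? x with
        | none =>
            have hc : d.contains x = false := (PySem.Dict.get?_eq_none_iff_contains d x).1 hg
            rw [PySem.Dict.getD_of_not_contains d 0 hc]
            rw [show (0 : Int) + 1 = 1 by norm_num]
            rw [PySem.Dict.items_insert_of_not_contains d 1 hc, tfc_cnt_append]
            norm_num
        | some v =>
            have hc : d.contains x = true := by
              rw [PySem.Dict.contains_eq_isSome_get?, hg]; rfl
            have hmem : (x, v) ∈ d.items := PySem.Dict.mem_items_of_get?_eq_some d hg
            rw [PySem.Dict.getD_of_get?_eq_some d 0 hg,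
                PySem.Dict.items_insert_of_contains d (v + 1) hc,
                tfc_cnt_map_update d.items x v hnod hmem hpos]
            by_cases h1 : v = 1 <;> simp [h1]
      rw [hstep]
      refine ih (tfcStepC d x) (PySem.Dict.nodup_keys_insert _ _ _ hnod) ?_
      intro p hp
      rcases (PySem.Dict.mem_items_insert _ _ _ p).1 hp with h | h
      · have hv : (0 : Int) ≤ d.getD x 0 := by
          cases hg : d.get? x with
          | none => rw [PySem.Dict.getD_eq_get?_getD, hg]; norm_num
          | some v =>
              have := hpos _ (PySem.Dict.mem_items_of_get?_eq_some d hg)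
              rw [PySem.Dict.getD_of_get?_eq_some d 0 hg]; omega
        rw [h]; show 1 ≤ d.getD x 0 + 1; omega
      · exact hpos p h.1

lemma tfc_foldl_foldl {α β : Type} (f : β → α → β) (tracks : List (List α)) (init : β) :
    tracks.foldl (fun s tr => tr.foldl f s) init = tracks.flatten.foldl f init := by
  induction tracks generalizing init with
  | nil => rfl
  | cons tr rest ih => simp [List.foldl_append, ih]

-- ===== VERDICT (by name: the statement is the Claim_ definition above) =====
theorem tabulate_frame_count_spec : Claim_equal_tabulate_frame_count := by
  intro tracks _
  unfold Spec_tabulate_frame_count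
  simp only [tabulate_frame_count, tabulate_frame_count_alt]
  rw [tfc_foldl_foldl tfcStepA, tfc_foldA_eq_foldC]
  have h := tfc_inv (tracks.flatten.map Prod.fst) PySem.Dict.empty
    (by rw [PySem.Dict.keys_empty]; exact List.nodup_nil)
    (by intro p hp; cases hp)
  rw [show tfcCnt (PySem.Dict.empty : PySem.Dict Int Int).items = 0 from rfl] at h
  rw [h]
  have hcnt : (tracks.flatten.map Prod.fst).foldl tfcStepC PySem.Dict.empty
      = PySem.Dict.counter (tracks.flatten.map Prod.fst) :=
    PySem.Dict.foldl_insert_getD_add_one_eq_counter _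
  have hkeys : tracks.flatMap (fun track => track.map (fun spot => spot.1))
      = tracks.flatten.map Prod.fst := by
    rw [List.map_flatten]; rfl
  rw [hcnt, PySem.Dict.items_counter, hkeys]
  rw [tfc_foldl_values, zero_add]
  have hded : PySem.List.dedup (tracks.flatten.map Prod.fst)
      = PySem.Set.ofList (tracks.flatten.map Prod.fst) := PySem.List.dedup_eq_ofList _
  rw [hded]
  simp [PySem.List.count]
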